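-- pv_equiv track=rewrite | github.com/danielx-art/fdstruct | fdstruct.py | should_ignore
-- ===== SOURCE A (Python) =====
-- def should_ignore(entry_name, ignore_list, all_files):
--     if entry_name.startswith('.') and not all_files:
--         return True
--     for pattern in ignore_list:
--         if pattern.startswith('/') and pattern[1:] == entry_name:
--             return True
--         elif pattern.startswith('*.') and entry_name.endswith(pattern[1:]):
--             return True
--         elif entry_name == pattern:
--             return True
--     return False
-- ===== SOURCE B (Python) =====
-- def should_ignore(entry_name, ignore_list, all_files):
--     if entry_name.startswith('.') and not all_files:
--         return True
--     exact = set(ignore_list)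
--     slashed = {p[1:] for p in ignore_list if p.startswith('/')}
--     suffixes = [p[1:] for p in ignore_list if p.startswith('*.')]
--     return (entry_name in exact
--             or entry_name in slashed
--             or any(entry_name.endswith(s) for s in suffixes))
-- ===== Notes on version B (the rewrite author's own statement) =====
-- stated objective: idiomatic
-- what changed: Replaces A's single branchy early-return scan with an index-then-check design: one exact-match set of all patterns, a set of '/'-stripped patterns, and a list of '*.'-stripped suffixes built by comprehensions, then three independent membership/suffix checks combined with or.
import Mathlib
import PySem

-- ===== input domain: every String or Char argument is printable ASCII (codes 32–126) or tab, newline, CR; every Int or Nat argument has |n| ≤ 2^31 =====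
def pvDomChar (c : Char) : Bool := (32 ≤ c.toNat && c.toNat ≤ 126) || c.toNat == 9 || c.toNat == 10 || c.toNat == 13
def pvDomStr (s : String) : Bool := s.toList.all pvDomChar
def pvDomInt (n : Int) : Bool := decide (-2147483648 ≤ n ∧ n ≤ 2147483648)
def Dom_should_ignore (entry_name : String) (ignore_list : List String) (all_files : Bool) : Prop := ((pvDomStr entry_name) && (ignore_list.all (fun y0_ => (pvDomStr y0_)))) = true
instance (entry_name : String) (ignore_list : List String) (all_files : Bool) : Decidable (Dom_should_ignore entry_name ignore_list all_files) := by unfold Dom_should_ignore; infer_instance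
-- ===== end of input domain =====

-- B builds an exact-set / slash-set / suffix-list index by comprehensions, then checks membership (idiomatic restructuring; same result).
-- ===== PORT A =====
-- the for-loop over ignore_list with early returns, as structural recursion
def should_ignore_loop (entry_name : String) : List String → Bool
  | [] => false
  | pattern :: rest =>
    if PySem.Str.startswith pattern "/" && (PySem.Str.slice pattern (some 1) none == entry_name) then true
    else if PySem.Str.startswith pattern "*." && PySem.Str.endswith entry_name (PySem.Str.slice pattern (some 1) none) then true
    else if entry_name == pattern then true
    else should_ignore_loop entry_name rest

def should_ignore (entry_name : String) (ignore_list : List String) (all_files : Bool) : Bool :=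
  if PySem.Str.startswith entry_name "." && !all_files then true
  else should_ignore_loop entry_name ignore_list

-- ===== PORT B =====
def should_ignore_alt (entry_name : String) (ignore_list : List String) (all_files : Bool) : Bool :=
  if PySem.Str.startswith entry_name "." && !all_files then true
  else
    let exact : PySem.Set String := PySem.Set.ofList ignore_list
    let slashed : PySem.Set String := PySem.Set.ofList
      ((ignore_list.filter (fun p => PySem.Str.startswith p "/")).map
        (fun p => PySem.Str.slice p (some 1) none))
    let suffixes : List String :=
      (ignore_list.filter (fun p => PySem.Str.startswith p "*.")).map
        (fun p => PySem.Str.slice p (some 1) none)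
    PySem.Set.contains exact entry_name
      || PySem.Set.contains slashed entry_name
      || suffixes.any (fun s => PySem.Str.endswith entry_name s)

-- ===== PRECONDITION & SPEC =====
def Spec_should_ignore (entry_name : String) (ignore_list : List String) (all_files : Bool) (out : Bool) : Prop := out = should_ignore_alt entry_name ignore_list all_files
instance (entry_name : String) (ignore_list : List String) (all_files : Bool) (out : Bool) : Decidable (Spec_should_ignore entry_name ignore_list all_files out) := by unfold Spec_should_ignore; infer_instance

-- ===== CLAIM (what is proved, stated in full; the proofs are below) =====
def Claim_equal_should_ignore : Prop := ∀ (entry_name : String) (ignore_list : List String) (all_files : Bool), Dom_should_ignore entry_name ignore_list all_files → Spec_should_ignore entry_name ignore_list all_files (should_ignore entry_name ignore_list all_files)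

-- ===== LEMMAS AND PROOFS =====

-- A's loop returns true iff some pattern matches by one of the three rules
theorem loop_true_iff (e : String) (l : List String) :
    should_ignore_loop e l = true ↔
      ∃ p ∈ l,
        (PySem.Str.startswith p "/" = true ∧ PySem.Str.slice p (some 1) none = e)
        ∨ (PySem.Str.startswith p "*." = true ∧ PySem.Str.endswith e (PySem.Str.slice p (some 1) none) = true)
        ∨ e = p := by
  induction l with
  | nil => simp [should_ignore_loop]
  | cons p rest ih =>
    simp only [should_ignore_loop]
    split_ifs with h1 h2 h3
    · simp only [true_iff]
      exact ⟨p, List.mem_cons_self, Or.inl (by simpa using h1)⟩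
    · simp only [true_iff]
      exact ⟨p, List.mem_cons_self, Or.inr (Or.inl (by simpa using h2))⟩
    · simp only [true_iff]
      exact ⟨p, List.mem_cons_self, Or.inr (Or.inr (by simpa using h3))⟩
    · rw [ih]
      constructor
      · rintro ⟨q, hq, h⟩; exact ⟨q, List.mem_cons_of_mem _ hq, h⟩
      · rintro ⟨q, hq, h⟩
        rcases List.mem_cons.mp hq with rfl | hq
        · exfalso
          rcases h with ⟨hs, he⟩ | ⟨hs, he⟩ | he <;> simp_all
        · exact ⟨q, hq, h⟩

-- ===== VERDICT (by name: the statement is the Claim_ definition above) =====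
theorem should_ignore_spec : Claim_equal_should_ignore := by
  intro e l af _
  unfold Spec_should_ignore should_ignore should_ignore_alt
  cases hdot : (PySem.Str.startswith e "." && !af) with
  | true => simp [hdot]
  | false =>
    simp only [hdot, Bool.false_eq_true, if_false]
    rw [Bool.eq_iff_iff, loop_true_iff]
    simp only [Bool.or_eq_true, PySem.Set.contains_iff, PySem.Set.mem_ofList,
      List.mem_map, List.mem_filter, List.any_eq_true]
    constructor
    · rintro ⟨p, hp, (⟨hs, he⟩ | ⟨hs, he⟩ | he)⟩
      · exact Or.inl (Or.inr ⟨p, ⟨hp, hs⟩, he⟩)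
      · exact Or.inr ⟨_, ⟨p, ⟨hp, hs⟩, rfl⟩, he⟩
      · subst he; exact Or.inl (Or.inl hp)
    · rintro ((hp | ⟨p, ⟨hp, hs⟩, he⟩) | ⟨x, ⟨p, ⟨hp, hs⟩, rfl⟩, he⟩)
      · exact ⟨e, hp, Or.inr (Or.inr rfl)⟩
      · exact ⟨p, hp, Or.inl ⟨hs, he⟩⟩
      · exact ⟨p, hp, Or.inr (Or.inl ⟨hs, he⟩)⟩
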